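-- pv_equiv track=rewrite | github.com/dna-storage/preview-cluster | file-sequencer-analysis/misc/preview_strip.py | end_match
-- ===== SOURCE A (Python) =====
-- def end_match(forward,string1,string2):
--     _string2=string2
--     _string1=string1
--     if forward==False:
--         _string2=string2[::-1]
--         _string1=string1[::-1]
--     #padding out strings so their 3' ends match up
--     if len(_string1)>len(_string2):
--         _string2=["x"]*(len(_string1)-len(_string2))
--         _string2="".join(_string2)
--         _string2=_string2+string2
--         assert(len(_string1)==len(_string2))
--     elif len(_string2)>len(_string1):
--         _string1=["x"]*len(_string2)-len(_string1)
--         _string1="".join(_string1)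
--         _string1=_string1+string1
--     for moves in range(0,len(string1)):
--         if _string1[moves::]==_string2[moves::]:
--             return len(string1)-moves
--     return 0
-- ===== SOURCE B (Python) =====
-- def end_match(forward, string1, string2):
--     if forward:
--         s1, s2 = string1, string2
--     else:
--         s1, s2 = string1[::-1], string2[::-1]
--     if len(string1) > len(string2):
--         # pad string2 on the left so the 3' ends line up (as A does, with the
--         # un-reversed string2)
--         s2 = "x" * (len(string1) - len(string2)) + string2
--     k = 0
--     for c1, c2 in zip(reversed(s1), reversed(s2)):
--         if c1 != c2:
--             break
--         k += 1
--     return k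
-- ===== Notes on version B (the rewrite author's own statement) =====
-- stated objective: faster
-- what changed: A compares the two whole suffixes s1[moves:]==s2[moves:] for every offset (quadratic slice comparisons); B does one backward character scan over the padded strings counting the common suffix length. Pre_ excludes len(string1) < len(string2), where A raises TypeError (["x"]*len-len subtracts an int from a list).
import Mathlib
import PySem

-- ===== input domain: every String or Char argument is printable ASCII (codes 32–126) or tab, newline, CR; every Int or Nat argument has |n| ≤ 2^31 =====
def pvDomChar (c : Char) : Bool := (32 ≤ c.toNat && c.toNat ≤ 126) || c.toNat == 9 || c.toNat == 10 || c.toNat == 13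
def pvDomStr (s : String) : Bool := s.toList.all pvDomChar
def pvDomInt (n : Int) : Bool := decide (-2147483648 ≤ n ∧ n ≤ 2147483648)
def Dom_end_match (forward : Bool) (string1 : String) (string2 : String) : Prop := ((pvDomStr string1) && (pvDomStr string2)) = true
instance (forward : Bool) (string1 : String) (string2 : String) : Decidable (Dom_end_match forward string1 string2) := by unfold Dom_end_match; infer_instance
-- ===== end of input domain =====

-- B replaces A's quadratic scan over all suffix pairs by a single backward
-- character scan counting the common suffix of the padded strings (objective: faster).

-- ===== PORT A =====
-- for moves in range(0, len(string1)): if _string1[moves::]==_string2[moves::]: return len(string1)-moves / return 0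
def endMatchLoopA (s1 s2 : List Char) (n : Nat) (moves : Nat) : Int :=
  if moves < n then
    if PySem.List.slice s1 (some (moves : Int)) none = PySem.List.slice s2 (some (moves : Int)) none
    then (n : Int) - (moves : Int)
    else endMatchLoopA s1 s2 n (moves + 1)
  else 0
termination_by n - moves

def end_match (forward : Bool) (string1 : String) (string2 : String) : Int :=
  -- strings are handled as their code-point lists (exact for ASCII and beyond);
  -- string[::-1] = .reverse (PySem.List.slice?_none_none_neg_one)
  let s1 := string1.toList
  let s2 := string2.toList
  let t1 := if forward = false then s1.reverse else s1   -- _string1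
  let t2 := if forward = false then s2.reverse else s2   -- _string2
  if s2.length < s1.length then
    -- _string2 = "".join(["x"]*(len-len)) + string2  (note: the UN-reversed string2, as in A)
    endMatchLoopA t1 (List.replicate (s1.length - s2.length) 'x' ++ s2) s1.length 0
  else if s1.length < s2.length then
    0  -- Python raises TypeError here (["x"]*len(_string2)-len(_string1)); excluded by Pre_end_match
  else
    endMatchLoopA t1 t2 s1.length 0

-- ===== PORT B =====
-- for c1, c2 in zip(reversed(s1), reversed(s2)): if c1 != c2: break / k += 1
def endMatchLoopB : List Char → List Char → Int → Int
  | c1 :: t1, c2 :: t2, k => if c1 ≠ c2 then k else endMatchLoopB t1 t2 (k + 1)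
  | _, _, k => k

def end_match_alt (forward : Bool) (string1 : String) (string2 : String) : Int :=
  let s1 := if forward then string1.toList else string1.toList.reverse
  let s2 := if forward then string2.toList else string2.toList.reverse
  let s2 := if string2.toList.length < string1.toList.length
            then List.replicate (string1.toList.length - string2.toList.length) 'x' ++ string2.toList
            else s2
  endMatchLoopB s1.reverse s2.reverse 0

-- ===== PRECONDITION & SPEC =====
-- Pre_ excludes len(string1) < len(string2), on which A raises TypeError
-- (["x"]*len(_string2)-len(_string1) subtracts an int from a list).
def Pre_end_match (forward : Bool) (string1 : String) (string2 : String) : Prop :=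
  string2.toList.length ≤ string1.toList.length
instance (forward : Bool) (string1 : String) (string2 : String) : Decidable (Pre_end_match forward string1 string2) := by unfold Pre_end_match; infer_instance

def pvWitness_end_match : Bool × String × String := (true, "ab", "b")

def Spec_end_match (forward : Bool) (string1 : String) (string2 : String) (out : Int) : Prop := out = end_match_alt forward string1 string2
instance (forward : Bool) (string1 : String) (string2 : String) (out : Int) : Decidable (Spec_end_match forward string1 string2 out) := by unfold Spec_end_match; infer_instance

-- ===== CLAIM (what is proved, stated in full; the proofs are below) =====
def Claim_equal_end_match : Prop := ∀ (forward : Bool) (string1 : String) (string2 : String), Dom_end_match forward string1 string2 → Pre_end_match forward string1 string2 → Spec_end_match forward string1 string2 (end_match forward string1 string2)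
-- ===== LEMMAS AND PROOFS =====

-- length of the longest common prefix
def pvCpl : List Char → List Char → Nat
  | a :: t1, b :: t2 => if a = b then pvCpl t1 t2 + 1 else 0
  | _, _ => 0

theorem pvCpl_le_left : ∀ (r1 r2 : List Char), pvCpl r1 r2 ≤ r1.length
  | [], [] => by simp [pvCpl]
  | [], _ :: _ => by simp [pvCpl]
  | _ :: _, [] => by simp [pvCpl]
  | a :: t1, b :: t2 => by
    simp only [pvCpl, List.length_cons]
    split_ifs
    · have := pvCpl_le_left t1 t2; omega
    · omega

theorem loopB_eq_cpl : ∀ (r1 r2 : List Char) (k : Int),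
    endMatchLoopB r1 r2 k = k + (pvCpl r1 r2 : Int)
  | [], [], k => by simp [endMatchLoopB, pvCpl]
  | [], _ :: _, k => by simp [endMatchLoopB, pvCpl]
  | _ :: _, [], k => by simp [endMatchLoopB, pvCpl]
  | a :: t1, b :: t2, k => by
    by_cases h : a = b
    · simp only [endMatchLoopB, pvCpl, h, ne_eq, not_true_eq_false, ite_false,
        loopB_eq_cpl t1 t2 (k + 1)]
      push_cast; ring
    · simp [endMatchLoopB, pvCpl, h]

theorem take_eq_iff_le_cpl : ∀ (r1 r2 : List Char) (j : Nat),
    j ≤ r1.length → j ≤ r2.length → (r1.take j = r2.take j ↔ j ≤ pvCpl r1 r2)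
  | _, _, 0, _, _ => by simp
  | [], _, j + 1, h1, _ => by simp at h1
  | _ :: _, [], j + 1, _, h2 => by simp at h2
  | a :: t1, b :: t2, j + 1, h1, h2 => by
    simp only [List.take_succ_cons, List.cons.injEq, pvCpl]
    have ih := take_eq_iff_le_cpl t1 t2 j (by simpa using h1) (by simpa using h2)
    by_cases h : a = b
    · subst h
      rw [if_pos rfl]
      constructor
      · rintro ⟨-, ht⟩; exact Nat.succ_le_succ (ih.mp ht)
      · intro hj; exact ⟨rfl, ih.mpr (Nat.succ_le_succ_iff.mp hj)⟩
    · rw [if_neg h]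
      simp [h]

theorem drop_eq_iff (l1 l2 : List Char) (n m : Nat)
    (h1 : l1.length = n) (h2 : l2.length = n) (hm : m ≤ n) :
    (l1.drop m = l2.drop m ↔ n - m ≤ pvCpl l1.reverse l2.reverse) := by
  have key : ∀ (l : List Char), l.length = n → l.drop m = (l.reverse.take (n - m)).reverse := by
    intro l hl
    rw [List.take_reverse]
    have : l.length - (n - m) = m := by omega
    rw [this, List.reverse_reverse]
  rw [key l1 h1, key l2 h2, List.reverse_inj]
  exact take_eq_iff_le_cpl _ _ _ (by simp [h1]) (by simp [h2])

theorem loopA_eq : ∀ (d : Nat) (l1 l2 : List Char) (n moves : Nat),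
    l1.length = n → l2.length = n → moves + d = n →
    endMatchLoopA l1 l2 n moves = ((min (n - moves) (pvCpl l1.reverse l2.reverse) : Nat) : Int)
  | 0, l1, l2, n, moves, h1, h2, hd => by
    rw [endMatchLoopA, if_neg (by omega)]
    have : n - moves = 0 := by omega
    simp [this]
  | d + 1, l1, l2, n, moves, h1, h2, hd => by
    rw [endMatchLoopA, if_pos (by omega),
      PySem.List.slice_from_natCast, PySem.List.slice_from_natCast]
    have hdrop := drop_eq_iff l1 l2 n moves h1 h2 (by omega)
    by_cases hc : l1.drop moves = l2.drop moves
    · rw [if_pos hc]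
      have hk : n - moves ≤ pvCpl l1.reverse l2.reverse := hdrop.mp hc
      rw [min_eq_left hk]
      omega
    · rw [if_neg hc]
      have hk : ¬ (n - moves ≤ pvCpl l1.reverse l2.reverse) := fun h => hc (hdrop.mpr h)
      rw [loopA_eq d l1 l2 n (moves + 1) h1 h2 (by omega)]
      congr 1
      omega

theorem core (l1 l2 : List Char) (h : l1.length = l2.length) :
    endMatchLoopA l1 l2 l1.length 0 = endMatchLoopB l1.reverse l2.reverse 0 := by
  rw [loopA_eq l1.length l1 l2 l1.length 0 rfl h.symm (by omega), loopB_eq_cpl]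
  have hle : pvCpl l1.reverse l2.reverse ≤ l1.length := by
    simpa using pvCpl_le_left l1.reverse l2.reverse
  have : min (l1.length - 0) (pvCpl l1.reverse l2.reverse) = pvCpl l1.reverse l2.reverse := by omega
  rw [this]; ring

-- ===== VERDICT (by name: the statement is the Claim_ definition above) =====
theorem end_match_spec : Claim_equal_end_match := by
  intro f s1 s2 _ hpre
  unfold Pre_end_match at hpre
  unfold Spec_end_match end_match end_match_alt
  by_cases hl : s2.toList.length < s1.toList.length
  · cases f <;> simp only [Bool.false_eq_true, if_true, if_false, if_pos hl]
    · have h := core s1.toList.reverse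
        (List.replicate (s1.toList.length - s2.toList.length) 'x' ++ s2.toList)
        (by simp only [List.length_reverse, List.length_append, List.length_replicate]; omega)
      simpa using h
    · have h := core s1.toList
        (List.replicate (s1.toList.length - s2.toList.length) 'x' ++ s2.toList)
        (by simp only [List.length_append, List.length_replicate]; omega)
      simpa using h
  · have heq : s1.toList.length = s2.toList.length := by omega
    have hl2 : ¬ s1.toList.length < s2.toList.length := by omega
    cases f <;> simp only [Bool.false_eq_true, ite_true, ite_false, if_neg hl, if_neg hl2]
    · have h := core s1.toList.reverse s2.toList.reverse (by simp only [List.length_reverse]; exact heq)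
      simpa using h
    · have h := core s1.toList s2.toList heq
      simpa using h
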